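-- pv_equiv track=rewrite | github.com/perftool-incubator/bench-flexran | script-dir/pod/cpu.py | _cpus_to_hex
-- ===== SOURCE A (Python) =====
-- def _cpus_to_hex(cpus, max_segment_len=None):
--     cpu_list = [int(i in cpus) for i in range(max(cpus)+1)]
--     # Reverse the list, then create the binary number.
--     cpu_list.reverse()
--     cpu_binary = 0
--     for digit in cpu_list:
--         cpu_binary = 2 * cpu_binary + digit
--
--     cpu_hex = hex(cpu_binary)
--
--     if max_segment_len is None:
--         return cpu_hex
--     else:
--         # Split hex string into segments of max_mask_len with low order
--         # cpus first. For example, with max_mask_len of 8, we would split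
--         # this:
--         #   0xFFEEDDCCBBAA998877665544332211
--         # into:
--         #   0x44332211 0x88776655 0xCCBBAA99 0xFFEEDD
--         position = 0
--         split_cpu_hex = ''
--         # Remove '0x' prefix
--         cpu_hex = cpu_hex[2:]
--         while position < len(cpu_hex):
--             if position == 0:
--                 split_cpu_hex += ('0x' + cpu_hex[-(max_segment_len + position):])
--             else:
--                 split_cpu_hex += (' 0x' + cpu_hex[-(max_segment_len + position):-position])
--             position += max_segment_len
--         return split_cpu_hex
-- ===== SOURCE B (Python) =====
-- def _cpus_to_hex(cpus, max_segment_len=None):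
--     # Build the bitmask arithmetically: OR in one bit per (non-negative) cpu.
--     cpu_binary = 0
--     for c in cpus:
--         if c >= 0:
--             cpu_binary |= 1 << c
--     if max_segment_len is None:
--         return hex(cpu_binary)
--     # Segment the integer arithmetically, low-order segment first; every segment
--     # except the top one is zero-padded to max_segment_len hex digits.
--     digits = len(format(cpu_binary, 'x'))
--     nseg = (digits + max_segment_len - 1) // max_segment_len
--     bits = 4 * max_segment_len
--     parts = []
--     for k in range(nseg - 1):
--         seg = (cpu_binary >> (bits * k)) & ((1 << bits) - 1)
--         parts.append('0x' + format(seg, 'x').zfill(max_segment_len))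
--     parts.append('0x' + format(cpu_binary >> (bits * (nseg - 1)), 'x'))
--     return ' '.join(parts)
-- ===== Notes on version B (the rewrite author's own statement) =====
-- stated objective: alternative
-- what changed: B builds the bitmask by OR-ing one bit per cpu instead of folding an indicator list over range(max+1), and produces the segmented output by arithmetic shift/mask extraction of each segment (zero-padding all but the top one and joining a parts list) instead of A's negative-index string-slice carving in a while loop.
import Mathlib
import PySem

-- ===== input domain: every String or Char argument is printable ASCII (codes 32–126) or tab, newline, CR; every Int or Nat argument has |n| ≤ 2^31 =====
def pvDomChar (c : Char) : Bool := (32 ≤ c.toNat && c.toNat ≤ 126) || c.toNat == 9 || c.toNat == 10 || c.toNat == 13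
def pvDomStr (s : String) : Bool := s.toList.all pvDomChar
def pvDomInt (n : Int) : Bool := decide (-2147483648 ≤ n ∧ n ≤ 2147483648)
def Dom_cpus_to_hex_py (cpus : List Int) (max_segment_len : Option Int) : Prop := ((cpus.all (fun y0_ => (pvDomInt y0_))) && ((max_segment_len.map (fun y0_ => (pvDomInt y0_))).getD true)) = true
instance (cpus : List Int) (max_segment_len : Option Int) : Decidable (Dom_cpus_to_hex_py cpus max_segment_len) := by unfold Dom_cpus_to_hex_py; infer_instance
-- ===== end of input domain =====

-- B re-implements the segmented branch by arithmetic bit-mask extraction (shift/mask per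
-- segment, join of a parts list) instead of A's negative-index string-slice carving; the
-- bitmask itself is OR-accumulated directly instead of via an indicator list. objective: alternative.

-- ===== PORT A =====
-- hex digits of a non-negative int, lowercase, no prefix: exact port of what hex(n)/format(n,'x')
-- produce for n ≥ 0 (both ports' Pythons only ever format non-negative ints).
def pvHexDigit (n : Nat) : Char := if n < 10 then Char.ofNat (48 + n) else Char.ofNat (87 + n)

-- structural fuel form (any fuel > n computes the same digits, since n/16 < n), written
-- tail-recursively with an accumulator so that both kernel and evaluator handle it
def pvHexAux : Nat → Nat → List Char → List Char
  | 0, _, acc => acc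
  | fuel+1, n, acc => if n < 16 then pvHexDigit n :: acc else pvHexAux fuel (n / 16) (pvHexDigit (n % 16) :: acc)

def pvHex (n : Nat) : List Char := pvHexAux (n+1) n []

-- A's while loop; fuel only makes the recursion total (for msl ≥ 1 it is never exhausted:
-- the loop runs at most len(cs) iterations and we pass fuel = len(cs) + 1).
def pvALoop (cs : List Char) (msl : Int) : Nat → Int → List Char → List Char
  | 0, _, acc => acc
  | fuel+1, pos, acc =>
    if pos < (cs.length : Int) then
      let acc' := if pos = 0
        then acc ++ ('0' :: 'x' :: PySem.List.slice cs (some (-(msl + pos))) none)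
        else acc ++ (' ' :: '0' :: 'x' :: PySem.List.slice cs (some (-(msl + pos))) (some (-pos)))
      pvALoop cs msl fuel (pos + msl) acc'
    else acc

def cpus_to_hex_py (cpus : List Int) (max_segment_len : Option Int) : String :=
  -- max(cpus): raises ValueError on [], excluded by Pre_
  let m := (PySem.List.max? cpus (fun x => x)).getD 0
  let cpu_list := ((PySem.List.pyRange 0 (m+1) 1).map (fun i => if cpus.contains i then (1:Int) else 0)).reverse
  let cpu_binary := cpu_list.foldl (fun b digit => 2*b + digit) 0
  let hexDigits := pvHex cpu_binary.toNat   -- cpu_hex = '0x' + hexDigits (cpu_binary ≥ 0 always)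
  match max_segment_len with
  | none => String.ofList ('0' :: 'x' :: hexDigits)
  | some msl => String.ofList (pvALoop hexDigits msl (hexDigits.length + 1) 0 [])

-- ===== PORT B =====
def cpus_to_hex_py_alt (cpus : List Int) (max_segment_len : Option Int) : String :=
  let cpu_binary : Nat := cpus.foldl (fun b (c : Int) => if 0 ≤ c then b ||| (1 <<< c.toNat) else b) 0
  match max_segment_len with
  | none => String.ofList ('0' :: 'x' :: pvHex cpu_binary)
  | some msl =>
    let digits : Int := ((pvHex cpu_binary).length : Int)      -- len(format(cpu_binary,'x'))
    let nseg : Int := PySem.Int.floordiv (digits + msl - 1) msl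
    let bits : Int := 4 * msl
    let parts := (PySem.List.pyRange 0 (nseg - 1) 1).map (fun k =>
      let seg := (cpu_binary >>> (bits * k).toNat) &&& ((1 <<< bits.toNat) - 1)   -- shift amounts ≥ 0 under Pre_
      '0' :: 'x' :: PySem.Chars.zfill (pvHex seg) msl)
    let parts := parts ++ ['0' :: 'x' :: pvHex (cpu_binary >>> (bits * (nseg - 1)).toNat)]
    String.ofList (PySem.Chars.join [' '] parts)

-- ===== PRECONDITION & SPEC =====
-- Pre_ excludes exactly the inputs where A does not return: cpus = [] (max([]) raises
-- ValueError) and max_segment_len ≤ 0 (A's while loop never advances past/shrinks position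
-- and loops forever).
def Pre_cpus_to_hex_py (cpus : List Int) (max_segment_len : Option Int) : Prop :=
  cpus ≠ [] ∧ 1 ≤ max_segment_len.getD 1
instance (cpus : List Int) (max_segment_len : Option Int) : Decidable (Pre_cpus_to_hex_py cpus max_segment_len) := by unfold Pre_cpus_to_hex_py; infer_instance
def pvWitness_cpus_to_hex_py : List Int × Option Int := ([0, 2, 9], some 2)

def Spec_cpus_to_hex_py (cpus : List Int) (max_segment_len : Option Int) (out : String) : Prop := out = cpus_to_hex_py_alt cpus max_segment_len
instance (cpus : List Int) (max_segment_len : Option Int) (out : String) : Decidable (Spec_cpus_to_hex_py cpus max_segment_len out) := by unfold Spec_cpus_to_hex_py; infer_instance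

-- ===== CLAIM (what is proved, stated in full; the proofs are below) =====
def Claim_equal_cpus_to_hex_py : Prop := ∀ (cpus : List Int) (max_segment_len : Option Int), Dom_cpus_to_hex_py cpus max_segment_len → Pre_cpus_to_hex_py cpus max_segment_len → Spec_cpus_to_hex_py cpus max_segment_len (cpus_to_hex_py cpus max_segment_len)
-- ===== LEMMAS AND PROOFS =====

-- zero-padded field of exactly k hex digits (the value of format(x,'x').zfill(k) for x < 16^k,
-- and of the k-character slices A cuts out of the long hex string)
def pvPad : Nat → Nat → List Char
  | 0, _ => []
  | k+1, x => pvPad k (x / 16) ++ [pvHexDigit (x % 16)]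

-- the hex string of x cut into fields of s+1 digits,high-order first; head field unpadded
def pvChunks (s : Nat) (x : Nat) : List (List Char) :=
  if h : x < 16^(s+1) then [pvHex x]
  else pvChunks s (x / 16^(s+1)) ++ [pvPad (s+1) (x % 16^(s+1))]
decreasing_by
  have h16 : 16 ≤ 16^(s+1) := by
    calc (16:Nat) = 16^1 := by norm_num
    _ ≤ 16^(s+1) := Nat.pow_le_pow_right (by norm_num) (by omega)
  exact Nat.div_lt_self (by omega) (by omega)

lemma pvHexAux_acc (f : Nat) : ∀ n acc, pvHexAux f n acc = pvHexAux f n [] ++ acc := by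
  induction f with
  | zero => intro n acc; simp [pvHexAux]
  | succ f ih =>
    intro n acc
    by_cases h : n < 16
    · simp [pvHexAux, h]
    · simp only [pvHexAux, if_neg h]
      rw [ih (n / 16) (pvHexDigit (n % 16) :: acc), ih (n / 16) [pvHexDigit (n % 16)]]
      simp

lemma pvHexAux_irrel (f1 : Nat) : ∀ f2 n, n < f1 → n < f2 → pvHexAux f1 n [] = pvHexAux f2 n [] := by
  induction f1 with
  | zero => intro f2 n h1 _; omega
  | succ f ih =>
    intro f2 n h1 h2
    cases f2 with
    | zero => omega
    | succ g =>
      by_cases h : n < 16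
      · simp [pvHexAux, h]
      · have hd : n / 16 < n := Nat.div_lt_self (by omega) (by omega)
        simp only [pvHexAux, if_neg h]
        rw [pvHexAux_acc f (n / 16), pvHexAux_acc g (n / 16)]
        rw [ih g (n / 16) (by omega) (by omega)]

lemma pvHex_lt (x : Nat) (h : x < 16) : pvHex x = [pvHexDigit x] := by
  simp [pvHex, pvHexAux, h]

lemma pvHex_ge (x : Nat) (h : ¬ x < 16) : pvHex x = pvHex (x / 16) ++ [pvHexDigit (x % 16)] := by
  have hd : x / 16 < x := Nat.div_lt_self (by omega) (by omega)
  simp only [pvHex]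
  conv_lhs => rw [pvHexAux]
  rw [if_neg h, pvHexAux_acc x (x/16), pvHexAux_irrel x (x/16+1) (x/16) (by omega) (by omega)]

lemma pvHex_ne_nil (x : Nat) : pvHex x ≠ [] := by
  by_cases h : x < 16
  · rw [pvHex_lt x h]; simp
  · rw [pvHex_ge x h]; simp

lemma pvHex_len_pos (x : Nat) : 1 ≤ (pvHex x).length := by
  have := pvHex_ne_nil x
  cases hx : pvHex x with
  | nil => exact absurd hx this
  | cons a t => simp [hx]

lemma pvHexDigit_no_sign (n : Nat) (h : n < 16) : pvHexDigit n ≠ '+' ∧ pvHexDigit n ≠ '-' := by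
  interval_cases n <;> decide

lemma pvHex_no_sign (x : Nat) : ∀ c ∈ pvHex x, c ≠ '+' ∧ c ≠ '-' := by
  induction x using Nat.strong_induction_on with
  | _ x ih =>
    by_cases h : x < 16
    · rw [pvHex_lt x h]; intro c hc; simp at hc; subst hc; exact pvHexDigit_no_sign x h
    · rw [pvHex_ge x h]; intro c hc
      rcases List.mem_append.mp hc with h1 | h2
      · exact ih (x/16) (Nat.div_lt_self (by omega) (by omega)) c h1
      · simp at h2; subst h2; exact pvHexDigit_no_sign _ (Nat.mod_lt _ (by omega))

lemma len_pvHex_le (k x : Nat) (hx : x < 16^k) (hk : 1 ≤ k) : (pvHex x).length ≤ k := by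
  induction k generalizing x with
  | zero => omega
  | succ k ih =>
    by_cases h : x < 16
    · rw [pvHex_lt x h]; simp
    · rw [pvHex_ge x h]
      have hk1 : 1 ≤ k := by
        rcases Nat.eq_zero_or_pos k with hk0 | hp
        · subst hk0; simp at hx; omega
        · exact hp
      have hlt : x / 16 < 16^k := by
        rw [Nat.div_lt_iff_lt_mul (by omega)]
        calc x < 16^(k+1) := hx
        _ = 16^k * 16 := by ring
      have := ih (x/16) hlt hk1
      simp only [List.length_append, List.length_cons, List.length_nil]
      omega

lemma pvPad_len (k : Nat) : ∀ x, (pvPad k x).length = k := by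
  induction k with
  | zero => intro x; simp [pvPad]
  | succ k ih => intro x; simp [pvPad, ih]

lemma hex_decomp (k y x : Nat) (hy : 0 < y) (hx : x < 16^k) :
    pvHex (y * 16^k + x) = pvHex y ++ pvPad k x := by
  induction k generalizing x with
  | zero =>
    have : x = 0 := by simpa using hx
    subst this; simp [pvPad]
  | succ k ih =>
    have h16 : (16:Nat) ≤ 16^(k+1) := by
      calc (16:Nat) = 16^1 := by norm_num
      _ ≤ 16^(k+1) := Nat.pow_le_pow_right (by norm_num) (by omega)
    have hN : ¬ (y * 16^(k+1) + x < 16) := by nlinarith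
    rw [pvHex_ge _ hN]
    have hrw : y * 16^(k+1) + x = 16 * (y * 16^k) + x := by ring
    have hdiv : (y * 16^(k+1) + x) / 16 = y * 16^k + x / 16 := by
      rw [hrw, Nat.mul_add_div (by omega)]
    have hmod : (y * 16^(k+1) + x) % 16 = x % 16 := by
      rw [hrw, Nat.mul_add_mod]
    have hlt : x / 16 < 16^k := by
      rw [Nat.div_lt_iff_lt_mul (by omega)]
      calc x < 16^(k+1) := hx
      _ = 16^k * 16 := by ring
    rw [hdiv, hmod, ih (x/16) hlt]
    simp [pvPad]

lemma pvPad_zero (k : Nat) : pvPad k 0 = List.replicate k '0' := by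
  induction k with
  | zero => simp [pvPad]
  | succ k ih =>
    show pvPad k (0/16) ++ [pvHexDigit (0 % 16)] = _
    rw [Nat.zero_div, ih, List.replicate_succ']
    rfl

lemma pvPad_eq (k x : Nat) (hx : x < 16^k) (hk : 1 ≤ k) :
    pvPad k x = List.replicate (k - (pvHex x).length) '0' ++ pvHex x := by
  induction k generalizing x with
  | zero => omega
  | succ k ih =>
    by_cases h : x < 16
    · have hx16 : x % 16 = x := Nat.mod_eq_of_lt h
      have hx0 : x / 16 = 0 := Nat.div_eq_of_lt h
      rw [pvHex_lt x h]
      show pvPad k (x / 16) ++ [pvHexDigit (x % 16)] = _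
      rw [hx0, hx16, pvPad_zero]
      simp
    · have hk1 : 1 ≤ k := by
        rcases Nat.eq_zero_or_pos k with hk0 | hp
        · subst hk0; simp at hx; omega
        · exact hp
      have hlt : x / 16 < 16^k := by
        rw [Nat.div_lt_iff_lt_mul (by omega)]
        calc x < 16^(k+1) := hx
        _ = 16^k * 16 := by ring
      rw [pvHex_ge x h]
      show pvPad k (x / 16) ++ [pvHexDigit (x % 16)] = _
      rw [ih (x/16) hlt hk1]
      simp only [List.length_append, List.length_cons, List.length_nil, List.append_assoc]
      congr 2
      omega

lemma zfill_eq_pad (k x : Nat) (hx : x < 16^k) (hk : 1 ≤ k) :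
    PySem.Chars.zfill (pvHex x) (k : Int) = pvPad k x := by
  have hlen := pvHex_len_pos x
  have hle := len_pvHex_le k x hx hk
  rw [pvPad_eq k x hx hk]
  by_cases h : (k:Int) ≤ ((pvHex x).length : Int)
  · have heq : (pvHex x).length = k := by omega
    simp [PySem.Chars.zfill, h, heq]
  · cases hcs : pvHex x with
    | nil => exact absurd hcs (pvHex_ne_nil x)
    | cons c rest =>
      have hsign := pvHex_no_sign x c (by rw [hcs]; exact List.mem_cons_self)
      rw [hcs] at h hlen hle
      rw [PySem.Chars.zfill, if_neg h, if_neg (by simp [hsign.1, hsign.2])]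
      simp
  

lemma pvChunks_lt (s x : Nat) (h : x < 16^(s+1)) : pvChunks s x = [pvHex x] := by
  rw [pvChunks]; simp [h]

lemma pvChunks_ge (s x : Nat) (h : ¬ x < 16^(s+1)) :
    pvChunks s x = pvChunks s (x / 16^(s+1)) ++ [pvPad (s+1) (x % 16^(s+1))] := by
  rw [pvChunks]; simp [h]

lemma pow16_ge (s : Nat) : (16:Nat) ≤ 16^(s+1) := by
  calc (16:Nat) = 16^1 := by norm_num
  _ ≤ 16^(s+1) := Nat.pow_le_pow_right (by norm_num) (by omega)

lemma pvChunks_len_pos (s x : Nat) : 1 ≤ (pvChunks s x).length := by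
  by_cases h : x < 16^(s+1)
  · rw [pvChunks_lt s x h]; simp
  · rw [pvChunks_ge s x h]; simp

lemma pvChunks_x_lt (s x : Nat) : x < (16^(s+1))^(pvChunks s x).length := by
  induction x using Nat.strong_induction_on with
  | _ x ih =>
    by_cases h : x < 16^(s+1)
    · rw [pvChunks_lt s x h]; simpa using h
    · rw [pvChunks_ge s x h]
      have hS := pow16_ge s
      have hdlt : x / 16^(s+1) < x := Nat.div_lt_self (by omega) (by omega)
      have hdc := ih _ hdlt
      simp only [List.length_append, List.length_cons, List.length_nil]
      have h1 : 16^(s+1) * (x / 16^(s+1)) + x % 16^(s+1) = x := Nat.div_add_mod x _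
      have h2 : x % 16^(s+1) < 16^(s+1) := Nat.mod_lt _ (by omega)
      have hx : x < 16^(s+1) * (x / 16^(s+1) + 1) := by
        rw [Nat.mul_add, Nat.mul_one]; omega
      calc x < 16^(s+1) * (x / 16^(s+1) + 1) := hx
      _ ≤ 16^(s+1) * (16^(s+1))^((pvChunks s (x / 16^(s+1))).length) := by
          exact Nat.mul_le_mul_left _ hdc
      _ = (16^(s+1))^((pvChunks s (x / 16^(s+1))).length + 1) := by rw [pow_succ]; ring

lemma pvChunks_len_formula (s x : Nat) :
    (pvHex x).length = ((pvChunks s x).length - 1) * (s+1)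
      + (pvHex (x / (16^(s+1))^((pvChunks s x).length - 1))).length := by
  induction x using Nat.strong_induction_on with
  | _ x ih =>
    by_cases h : x < 16^(s+1)
    · rw [pvChunks_lt s x h]; simp
    · have hS := pow16_ge s
      have hdlt : x / 16^(s+1) < x := Nat.div_lt_self (by omega) (by omega)
      have hdec : pvHex x = pvHex (x / 16^(s+1)) ++ pvPad (s+1) (x % 16^(s+1)) := by
        rw [← hex_decomp (s+1) (x / 16^(s+1)) (x % 16^(s+1))
              (Nat.div_pos (by omega) (by omega)) (Nat.mod_lt _ (by omega))]
        rw [Nat.div_add_mod' x]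
      rw [pvChunks_ge s x h, hdec]
      have hc1 := pvChunks_len_pos s (x / 16^(s+1))
      simp only [List.length_append, List.length_cons, List.length_nil, pvPad_len]
      rw [ih _ hdlt]
      have hdd : x / 16^(s+1) / (16^(s+1))^((pvChunks s (x / 16^(s+1))).length - 1)
          = x / (16^(s+1))^((pvChunks s (x / 16^(s+1))).length + 1 - 1) := by
        rw [Nat.div_div_eq_div_mul]
        congr 1
        rw [Nat.add_sub_cancel, ← pow_succ']
        congr 1
        omega
      rw [hdd]
      have hc' : (pvChunks s (x / 16^(s+1))).length + 1 - 1
          = ((pvChunks s (x / 16^(s+1))).length - 1) + 1 := by omega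
      rw [hc', add_mul, one_mul]
      omega

lemma pvChunks_rev_getD (s x k : Nat) (hk : k < (pvChunks s x).length) :
    (pvChunks s x).reverse.getD k [] =
      (if k = (pvChunks s x).length - 1 then pvHex (x / (16^(s+1))^k)
       else pvPad (s+1) (x / (16^(s+1))^k % 16^(s+1))) := by
  induction x using Nat.strong_induction_on generalizing k with
  | _ x ih =>
    by_cases h : x < 16^(s+1)
    · rw [pvChunks_lt s x h] at hk ⊢
      simp at hk
      subst hk
      simp
    · have hS := pow16_ge s
      have hdlt : x / 16^(s+1) < x := Nat.div_lt_self (by omega) (by omega)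
      have hc1 := pvChunks_len_pos s (x / 16^(s+1))
      rw [pvChunks_ge s x h] at hk ⊢
      rw [List.reverse_append]
      simp only [List.length_append, List.length_cons, List.length_nil] at hk ⊢
      cases k with
      | zero =>
        have hne : ¬ ((0:Nat) = (pvChunks s (x / 16^(s+1))).length + 1 - 1) := by omega
        rw [if_neg hne]
        simp [List.getD, pow_zero]
      | succ k =>
        have hklt : k < (pvChunks s (x / 16^(s+1))).length := by omega
        have : (List.reverse [pvPad (s+1) (x % 16^(s+1))]
            ++ (pvChunks s (x / 16^(s+1))).reverse).getD (k+1) []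
            = (pvChunks s (x / 16^(s+1))).reverse.getD k [] := by
          simp [List.getD]
        rw [this, ih _ hdlt k hklt]
        have hdd : x / 16^(s+1) / (16^(s+1))^k = x / (16^(s+1))^(k+1) := by
          rw [Nat.div_div_eq_div_mul, ← pow_succ']
        rw [hdd]
        by_cases hke : k = (pvChunks s (x / 16^(s+1))).length - 1
        · rw [if_pos hke, if_pos (show k + 1 = (pvChunks s (x / 16^(s+1))).length + 1 - 1 by omega)]
        · rw [if_neg hke, if_neg (show ¬ (k + 1 = (pvChunks s (x / 16^(s+1))).length + 1 - 1) by omega)]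

-- pvHex x = pvHex (x / 16^(s+1)) ++ pvPad (s+1) (x % 16^(s+1)) whenever x ≥ 16^(s+1)
lemma pvHex_split (s x : Nat) (h : ¬ x < 16^(s+1)) :
    pvHex x = pvHex (x / 16^(s+1)) ++ pvPad (s+1) (x % 16^(s+1)) := by
  have hS := pow16_ge s
  rw [← hex_decomp (s+1) (x / 16^(s+1)) (x % 16^(s+1))
        (Nat.div_pos (by omega) (by omega)) (Nat.mod_lt _ (by omega))]
  rw [Nat.div_add_mod' x]

-- the leading (unpadded) chunk is the prefix of the hex string that remains after
-- removing the (length-1) full fields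
lemma take_head (s : Nat) : ∀ y : Nat,
    (pvHex y).take ((pvHex y).length - (s+1)*((pvChunks s y).length - 1))
      = pvHex (y / (16^(s+1))^((pvChunks s y).length - 1)) := by
  intro y
  induction y using Nat.strong_induction_on with
  | _ y ih =>
    by_cases h : y < 16^(s+1)
    · rw [pvChunks_lt s y h]
      simp [List.take_of_length_le]
    · have hS := pow16_ge s
      have hdlt : y / 16^(s+1) < y := Nat.div_lt_self (by omega) (by omega)
      have hc1 := pvChunks_len_pos s (y / 16^(s+1))
      have hsplit := pvHex_split s y h
      have hlf := pvChunks_len_formula s (y / 16^(s+1))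
      have hheadpos : 1 ≤ (pvHex ((y / 16^(s+1)) / (16^(s+1))^((pvChunks s (y / 16^(s+1))).length - 1))).length := pvHex_len_pos _
      rw [pvChunks_ge s y h, hsplit]
      simp only [List.length_append, List.length_cons, List.length_nil, pvPad_len]
      have hC : (pvChunks s (y / 16^(s+1))).length + 1 - 1 = (pvChunks s (y / 16^(s+1))).length := by omega
      rw [hC]
      have hexp : (s+1) * (pvChunks s (y / 16^(s+1))).length
          = (s+1) * ((pvChunks s (y / 16^(s+1))).length - 1) + (s+1) := by
        obtain ⟨t, ht⟩ : ∃ t, (pvChunks s (y / 16^(s+1))).length = t + 1 := ⟨(pvChunks s (y / 16^(s+1))).length - 1, by omega⟩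
        rw [ht, Nat.add_sub_cancel, Nat.mul_add, Nat.mul_one]
      have hfloor : (s+1) * ((pvChunks s (y / 16^(s+1))).length - 1) < (pvHex (y / 16^(s+1))).length := by
        have : ((pvChunks s (y / 16^(s+1))).length - 1) * (s+1)
            = (s+1) * ((pvChunks s (y / 16^(s+1))).length - 1) := by ring
        omega
      have hamt : (pvHex (y / 16^(s+1))).length + (s+1) - (s+1) * (pvChunks s (y / 16^(s+1))).length
          = (pvHex (y / 16^(s+1))).length - (s+1) * ((pvChunks s (y / 16^(s+1))).length - 1) := by omega
      rw [hamt]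
      rw [List.take_append_of_le_length (by omega)]
      rw [ih _ hdlt]
      rw [Nat.div_div_eq_div_mul, ← pow_succ']
      have hee : (pvChunks s (y / 16^(s+1))).length - 1 + 1 = (pvChunks s (y / 16^(s+1))).length := by omega
      rw [hee]

lemma slice_negneg (cs : List Char) (a b : Nat) (ha : 1 ≤ a) (hb : 1 ≤ b) :
    PySem.List.slice cs (some (-(a:Int))) (some (-(b:Int)))
      = (cs.drop (cs.length - a)).take ((cs.length - b) - (cs.length - a)) := by
  simp [PySem.List.slice, PySem.List.clampIdx_neg_natCast _ a (by omega),
        PySem.List.clampIdx_neg_natCast _ b (by omega)]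

lemma slice_negnone (cs : List Char) (a : Nat) (ha : 1 ≤ a) :
    PySem.List.slice cs (some (-(a:Int))) none = cs.drop (cs.length - a) := by
  simp [PySem.List.slice, PySem.List.clampIdx_neg_natCast _ a (by omega)]


lemma slice_zero (s x : Nat) :
    PySem.List.slice (pvHex x) (some (-((s+1 : Nat) : Int))) none = (pvChunks s x).reverse.getD 0 [] := by
  rw [slice_negnone _ _ (by omega)]
  by_cases h : x < 16^(s+1)
  · rw [pvChunks_lt s x h]
    have hle : (pvHex x).length ≤ s+1 := len_pvHex_le (s+1) x h (by omega)
    have : (pvHex x).length - (s+1) = 0 := by omega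
    simp [this, List.getD]
  · rw [pvChunks_ge s x h, pvHex_split s x h]
    rw [List.reverse_append]
    have hlen : (pvHex (x / 16^(s+1)) ++ pvPad (s+1) (x % 16^(s+1))).length
        = (pvHex (x / 16^(s+1))).length + (s+1) := by simp [pvPad_len]
    rw [hlen]
    have : (pvHex (x / 16^(s+1))).length + (s+1) - (s+1) = (pvHex (x / 16^(s+1))).length := by omega
    rw [this]
    rw [List.drop_left]
    simp [List.getD]

lemma slice_k (s x : Nat) : ∀ k, 1 ≤ k → k < (pvChunks s x).length →
    PySem.List.slice (pvHex x) (some (-(((s+1)*(k+1) : Nat) : Int))) (some (-(((s+1)*k : Nat) : Int)))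
      = (pvChunks s x).reverse.getD k [] := by
  induction x using Nat.strong_induction_on with
  | _ x ih =>
    intro k hk1 hk
    by_cases h : x < 16^(s+1)
    · rw [pvChunks_lt s x h] at hk; simp at hk; omega
    · have hS := pow16_ge s
      have hdlt : x / 16^(s+1) < x := Nat.div_lt_self (by omega) (by omega)
      have hc1 := pvChunks_len_pos s (x / 16^(s+1))
      have hsplit := pvHex_split s x h
      have hL' : 1 ≤ (pvHex (x / 16^(s+1))).length := pvHex_len_pos _
      have hlenx : (pvHex x).length = (pvHex (x / 16^(s+1))).length + (s+1) := by
        rw [hsplit]; simp [pvPad_len]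
      -- number of chunks of x / 16^(s+1), and head-length bound,
      -- give (c'-1)*(s+1) < length of pvHex (x / 16^(s+1))
      have hlf := pvChunks_len_formula s (x / 16^(s+1))
      have hheadpos : 1 ≤ (pvHex ((x / 16^(s+1)) / (16^(s+1))^((pvChunks s (x / 16^(s+1))).length - 1))).length := pvHex_len_pos _
      have hfloor : ((pvChunks s (x / 16^(s+1))).length - 1) * (s+1) < (pvHex (x / 16^(s+1))).length := by omega
      rw [pvChunks_ge s x h] at hk ⊢
      simp only [List.length_append, List.length_cons, List.length_nil] at hk
      have hrev : (pvChunks s (x / 16^(s+1)) ++ [pvPad (s+1) (x % 16^(s+1))]).reverse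
          = pvPad (s+1) (x % 16^(s+1)) :: (pvChunks s (x / 16^(s+1))).reverse := by
        rw [List.reverse_append]; rfl
      rw [hrev]
      obtain ⟨k', rfl⟩ : ∃ k', k = k' + 1 := ⟨k - 1, by omega⟩
      have hgetD : (pvPad (s+1) (x % 16^(s+1)) :: (pvChunks s (x / 16^(s+1))).reverse).getD (k'+1) []
          = (pvChunks s (x / 16^(s+1))).reverse.getD k' [] := by simp [List.getD]
      rw [hgetD]
      have hk'c : k' < (pvChunks s (x / 16^(s+1))).length := by omega
      -- LHS arithmetic
      rw [slice_negneg _ _ _ (Nat.mul_pos (by omega) (by omega)) (Nat.mul_pos (by omega) (by omega)), hlenx]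
      have hmono : ∀ j, j ≤ (pvChunks s (x / 16^(s+1))).length - 1 →
          (s+1)*j ≤ (pvHex (x / 16^(s+1))).length := by
        intro j hj
        calc (s+1)*j ≤ (s+1)*((pvChunks s (x / 16^(s+1))).length - 1) :=
              Nat.mul_le_mul_left _ hj
        _ = ((pvChunks s (x / 16^(s+1))).length - 1) * (s+1) := by ring
        _ ≤ (pvHex (x / 16^(s+1))).length := by omega
      have hdropamt : (pvHex (x / 16^(s+1))).length + (s+1) - (s+1)*(k'+1+1)
          = (pvHex (x / 16^(s+1))).length - (s+1)*(k'+1) := by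
        have : (s+1)*(k'+1+1) = (s+1)*(k'+1) + (s+1) := by ring
        omega
      have hexp2 : (s+1)*(k'+1+1) = (s+1)*(k'+1) + (s+1) := by ring
      have hexp1 : (s+1)*(k'+1) = (s+1)*k' + (s+1) := by ring
      by_cases hcase : k' + 1 < (pvChunks s (x / 16^(s+1))).length
      · -- a middle (zero-padded) chunk
        have hmk1 : (s+1)*(k'+1) ≤ (pvHex (x / 16^(s+1))).length := by
          have := hmono (k'+1) (by omega); omega
        have hd : (pvHex (x / 16^(s+1))).length + (s+1) - (s+1)*(k'+1+1)
            = (pvHex (x / 16^(s+1))).length - (s+1)*(k'+1) := by omega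
        have he : (pvHex (x / 16^(s+1))).length + (s+1) - (s+1)*(k'+1)
            - ((pvHex (x / 16^(s+1))).length + (s+1) - (s+1)*(k'+1+1)) = s+1 := by omega
        rw [he, hd, hsplit]
        rw [List.drop_append_of_le_length (by omega)]
        rw [List.take_append_of_le_length (by simp [List.length_drop]; omega)]
        rcases Nat.eq_zero_or_pos k' with hk0 | hk0
        · subst hk0
          rw [← slice_zero s (x / 16^(s+1)), slice_negnone _ _ (by omega)]
          rw [Nat.mul_one]
          exact List.take_of_length_le (by simp [List.length_drop]; omega)
        · rw [← ih _ hdlt k' hk0 (by omega), slice_negneg _ _ _ (Nat.mul_pos (by omega) (by omega)) (Nat.mul_pos (by omega) (by omega))]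
          have h1 : (pvHex (x / 16^(s+1))).length - (s+1)*k'
              - ((pvHex (x / 16^(s+1))).length - (s+1)*(k'+1)) = s+1 := by omega
          rw [h1]
      · -- the leading chunk
        have hke : k' + 1 = (pvChunks s (x / 16^(s+1))).length := by omega
        have hmkC : (pvHex (x / 16^(s+1))).length ≤ (s+1)*(k'+1) := by
          have h1 : ((pvChunks s (x / 16^(s+1))).length - 1) * (s+1)
              = (s+1) * ((pvChunks s (x / 16^(s+1))).length - 1) := by ring
          have h2 : (s+1) * ((pvChunks s (x / 16^(s+1))).length - 1) + (s+1) = (s+1)*(k'+1) := by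
            rw [← hke]; have : k' + 1 - 1 = k' := by omega
            rw [this]; ring
          have hheadle : (pvHex ((x / 16^(s+1)) / (16^(s+1))^((pvChunks s (x / 16^(s+1))).length - 1))).length ≤ s+1 := by
            apply len_pvHex_le _ _ _ (by omega)
            have hxl := pvChunks_x_lt s (x / 16^(s+1))
            have hpowpos : 0 < (16^(s+1))^((pvChunks s (x / 16^(s+1))).length - 1) := by positivity
            have hCt : (16^(s+1))^((pvChunks s (x / 16^(s+1))).length - 1) * 16^(s+1)
                = (16^(s+1))^((pvChunks s (x / 16^(s+1))).length) := by
              rw [← pow_succ]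
              congr 1
              omega
            rw [Nat.div_lt_iff_lt_mul hpowpos, Nat.mul_comm, hCt]
            exact hxl
          omega
        have hd0 : (pvHex (x / 16^(s+1))).length + (s+1) - (s+1)*(k'+1+1) = 0 := by omega
        rw [hd0, List.drop_zero]
        -- use the head-prefix lemma on x itself
        have hth := take_head s x
        rw [pvChunks_ge s x h] at hth
        simp only [List.length_append, List.length_cons, List.length_nil] at hth
        have hC : (pvChunks s (x / 16^(s+1))).length + 1 - 1 = k' + 1 := by omega
        rw [hC] at hth
        have hlenx' : (pvHex x).length = (pvHex (x / 16^(s+1))).length + (s+1) := hlenx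
        rw [hlenx'] at hth
        simp only [Nat.sub_zero]
        rw [hth]
        rw [pvChunks_rev_getD s (x / 16^(s+1)) k' (by omega)]
        rw [if_pos (by omega)]
        rw [Nat.div_div_eq_div_mul, ← pow_succ']


lemma join_expand (y : List Char) (ys : List (List Char)) :
    PySem.Chars.join [' '] (y :: ys) = y ++ (ys.map (fun z => ' ' :: z)).flatten := by
  induction ys generalizing y with
  | nil => simp [PySem.Chars.join_singleton]
  | cons z zs ih => rw [PySem.Chars.join_cons_cons, ih z]; simp

lemma head_lt (s x : Nat) : x / (16^(s+1))^((pvChunks s x).length - 1) < 16^(s+1) := by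
  have hc1 := pvChunks_len_pos s x
  have hxl := pvChunks_x_lt s x
  have hpowpos : 0 < (16^(s+1))^((pvChunks s x).length - 1) := by positivity
  have hCt : (16^(s+1))^((pvChunks s x).length - 1) * 16^(s+1)
      = (16^(s+1))^((pvChunks s x).length) := by
    rw [← pow_succ]
    congr 1
    omega
  rw [Nat.div_lt_iff_lt_mul hpowpos, Nat.mul_comm, hCt]
  exact hxl

lemma len_head_le (s x : Nat) :
    (pvHex (x / (16^(s+1))^((pvChunks s x).length - 1))).length ≤ s+1 :=
  len_pvHex_le (s+1) _ (head_lt s x) (by omega)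

-- total length bracket: (c-1)*(s+1) < ℓ ≤ c*(s+1)
lemma len_bracket (s x : Nat) :
    ((pvChunks s x).length - 1) * (s+1) < (pvHex x).length
      ∧ (pvHex x).length ≤ (pvChunks s x).length * (s+1) := by
  have hc1 := pvChunks_len_pos s x
  have hlf := pvChunks_len_formula s x
  have hh1 := pvHex_len_pos (x / (16^(s+1))^((pvChunks s x).length - 1))
  have hh2 := len_head_le s x
  have hexp : (pvChunks s x).length * (s+1) = ((pvChunks s x).length - 1) * (s+1) + (s+1) := by
    obtain ⟨t, ht⟩ : ∃ t, (pvChunks s x).length = t + 1 := ⟨(pvChunks s x).length - 1, by omega⟩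
    rw [ht, Nat.add_sub_cancel, Nat.add_mul, Nat.one_mul]
  omega

lemma pvALoop_tail (s x : Nat) (j fuel : Nat) (acc : List Char) (hj : 1 ≤ j)
    (hfuel : (pvChunks s x).length - j ≤ fuel) :
    pvALoop (pvHex x) ((s:Int)+1) fuel (((s:Int)+1) * j) acc
      = acc ++ (((pvChunks s x).reverse.drop j).map (fun b => ' ' :: '0' :: 'x' :: b)).flatten := by
  induction fuel generalizing j acc with
  | zero =>
    have hjc : (pvChunks s x).length ≤ j := by omega
    rw [pvALoop, List.drop_eq_nil_of_le (by simpa using hjc)]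
    simp
  | succ fuel ih =>
    have hbr := len_bracket s x
    by_cases hjc : j < (pvChunks s x).length
    · have hposlt : ((s:Int)+1) * j < ((pvHex x).length : Int) := by
        have h1 : ((s:Int)+1) * (j:Nat) = (((s+1) * j : Nat) : Int) := by push_cast; ring
        rw [h1]
        have h2 : (s+1) * j ≤ (s+1) * ((pvChunks s x).length - 1) := Nat.mul_le_mul_left _ (by omega)
        have h3 : (s+1) * ((pvChunks s x).length - 1) = ((pvChunks s x).length - 1) * (s+1) := by ring
        exact_mod_cast by omega
      have hpos0 : ¬ (((s:Int)+1) * j = 0) := by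
        have : (1:Int) ≤ (s:Int)+1 := by omega
        have hj1 : (1:Int) ≤ (j:Int) := by exact_mod_cast hj
        nlinarith
      rw [pvALoop, if_pos hposlt]
      simp only [if_neg hpos0]
      have hargs : ((s:Int)+1) + ((s:Int)+1) * j = (((s+1) * (j+1) : Nat) : Int) := by push_cast; ring
      have hargs2 : -(((s:Int)+1) + ((s:Int)+1) * j) = -((((s+1) * (j+1) : Nat) : Int)) := by rw [hargs]
      have hargs3 : -(((s:Int)+1) * j) = -((((s+1) * j : Nat) : Int)) := by
        have : ((s:Int)+1) * j = (((s+1) * j : Nat) : Int) := by push_cast; ring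
        rw [this]
      rw [hargs2, hargs3, slice_k s x j hj hjc]
      have hnext : ((s:Int)+1) * j + (((s:Int))+1) = ((s:Int)+1) * (j+1 : Nat) := by push_cast; ring
      rw [hnext, ih (j+1) _ (by omega) (by omega)]
      conv_rhs => rw [List.drop_eq_getElem_cons (by simpa using hjc)]
      simp only [List.map_cons, List.flatten_cons, List.append_assoc]
      congr 2
      rw [List.getD_eq_getElem?_getD, List.getElem?_eq_getElem (by simpa using hjc)]
      rfl
    · have hcast : ((s:Int)+1) * (j:Nat) = (((s+1) * j : Nat) : Int) := by push_cast; ring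
      have h1 : (pvHex x).length ≤ (s+1) * j := by
        have h2 : (pvChunks s x).length * (s+1) ≤ j * (s+1) := Nat.mul_le_mul_right _ (by omega)
        have h3 : j * (s+1) = (s+1) * j := by ring
        omega
      have hge : ¬ (((s:Int)+1) * (j:Nat) < ((pvHex x).length : Int)) := by
        rw [hcast]
        exact_mod_cast Nat.not_lt.mpr h1
      rw [pvALoop, if_neg hge, List.drop_eq_nil_of_le (by simpa using Nat.not_lt.mp hjc)]
      simp


lemma A_seg (s x : Nat) :
    pvALoop (pvHex x) ((s:Int)+1) ((pvHex x).length + 1) 0 []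
      = PySem.Chars.join [' '] ((pvChunks s x).reverse.map (fun b => '0' :: 'x' :: b)) := by
  have hl1 := pvHex_len_pos x
  have hbr := len_bracket s x
  have hc1 := pvChunks_len_pos s x
  rw [pvALoop, if_pos (by exact_mod_cast hl1 : (0:Int) < ((pvHex x).length : Int))]
  simp only [if_pos rfl]
  have harg : -(((s:Int)+1) + 0) = -(((s+1 : Nat) : Int)) := by push_cast; ring
  have harg0 : ((s:Int)+1) + 0 = ((s:Int)+1) := by ring
  rw [show (0:Int) + (((s:Int))+1) = ((s:Int)+1) * ((1:Nat):Int) by push_cast; ring]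
  have hcle : (pvChunks s x).length - 1 ≤ (pvHex x).length := by
    have : (pvChunks s x).length - 1 ≤ ((pvChunks s x).length - 1) * (s+1) :=
      Nat.le_mul_of_pos_right _ (by omega)
    omega
  rw [pvALoop_tail s x 1 _ _ (le_refl 1) hcle]
  have hsl : PySem.List.slice (pvHex x) (some (-(((s:Int)+1) + 0))) none
      = (pvChunks s x).reverse.getD 0 [] := by
    rw [harg]; exact slice_zero s x
  rw [hsl]
  cases hrev : (pvChunks s x).reverse with
  | nil =>
    exfalso
    have h0 := congrArg List.length hrev
    rw [List.length_reverse] at h0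
    simp only [List.length_nil] at h0
    omega
  | cons r0 rest =>
    rw [List.map_cons, join_expand]
    simp [List.getD, List.map_map, Function.comp_def]

lemma B_seg (s x : Nat) :
    (let digits : Int := ((pvHex x).length : Int)
     let msl : Int := (s:Int)+1
     let nseg : Int := PySem.Int.floordiv (digits + msl - 1) msl
     let bits : Int := 4 * msl
     let parts := (PySem.List.pyRange 0 (nseg - 1) 1).map (fun k =>
       let seg := (x >>> (bits * k).toNat) &&& ((1 <<< bits.toNat) - 1)
       '0' :: 'x' :: PySem.Chars.zfill (pvHex seg) msl)
     parts ++ ['0' :: 'x' :: pvHex (x >>> (bits * (nseg - 1)).toNat)])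
    = (pvChunks s x).reverse.map (fun b => '0' :: 'x' :: b) := by
  have hc1 := pvChunks_len_pos s x
  have hbr := len_bracket s x
  have hexp : (pvChunks s x).length * (s+1) = ((pvChunks s x).length - 1) * (s+1) + (s+1) := by
    obtain ⟨t, ht⟩ : ∃ t, (pvChunks s x).length = t + 1 := ⟨(pvChunks s x).length - 1, by omega⟩
    rw [ht, Nat.add_sub_cancel, Nat.add_mul, Nat.one_mul]
  have hn1 : (pvChunks s x).length * (s+1) ≤ (pvHex x).length + s := by omega
  have hn2 : (pvHex x).length + s < ((pvChunks s x).length + 1) * (s+1) := by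
    have : ((pvChunks s x).length + 1) * (s+1) = (pvChunks s x).length * (s+1) + (s+1) := by ring
    omega
  have hnseg : PySem.Int.floordiv (((pvHex x).length : Int) + ((s:Int)+1) - 1) ((s:Int)+1)
      = (((pvChunks s x).length : Nat) : Int) := by
    rw [PySem.Int.floordiv_eq_iff_of_pos (by omega)]
    have hrw : ((pvHex x).length : Int) + ((s:Int)+1) - 1 = (((pvHex x).length + s : Nat) : Int) := by
      push_cast; ring
    rw [hrw]
    constructor
    · exact_mod_cast hn1
    · exact_mod_cast hn2
  have hc1' : (((pvChunks s x).length : Nat) : Int) - 1 = (((pvChunks s x).length - 1 : Nat) : Int) := by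
    omega
  simp only [hnseg, hc1', PySem.List.pyRange_zero_natCast, List.map_map]
  -- the shift amount of the top segment, as a Nat
  have etop : (4 * ((s:Int)+1) * (((pvChunks s x).length - 1 : Nat) : Int)).toNat
      = 4*(s+1)*((pvChunks s x).length - 1) := by
    have : (4 * ((s:Int)+1) * (((pvChunks s x).length - 1 : Nat) : Int))
        = ((4*(s+1)*((pvChunks s x).length - 1) : Nat) : Int) := by push_cast; ring
    rw [this, Int.toNat_natCast]
  have p1 : (2:Nat)^(4*(s+1)) = 16^(s+1) := by
    rw [pow_mul]; norm_num
  apply List.ext_getElem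
  · simp
    omega
  · intro i hi hi2
    have hic : i < (pvChunks s x).length := by simpa using hi2
    have hrevlen : i < (pvChunks s x).reverse.length := by simpa using hic
    have hgetD : (pvChunks s x).reverse[i]'hrevlen = (pvChunks s x).reverse.getD i [] := by
      rw [List.getD_eq_getElem?_getD, List.getElem?_eq_getElem hrevlen]
      rfl
    rw [List.getElem_map]
    by_cases hlast : i = (pvChunks s x).length - 1
    · subst hlast
      rw [List.getElem_append_right (by simp)]
      simp only [List.length_map, List.length_range]
      have hi0 : (pvChunks s x).length - 1 - ((pvChunks s x).length - 1) = 0 := by omega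
      simp only [hi0, List.getElem_singleton]
      rw [etop, Nat.shiftRight_eq_div_pow]
      have p2 : (2:Nat)^(4*(s+1)*((pvChunks s x).length - 1)) = (16^(s+1))^((pvChunks s x).length - 1) := by
        rw [pow_mul, p1]
      rw [p2, hgetD, pvChunks_rev_getD s x _ (by omega), if_pos rfl]
    · have hilt : i < (pvChunks s x).length - 1 := by omega
      rw [List.getElem_append_left (by simpa using hilt)]
      rw [List.getElem_map, List.getElem_range]
      simp only [Function.comp_apply]
      have e1 : (4 * ((s:Int)+1) * ((i:Nat):Int)).toNat = 4*(s+1)*i := by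
        have : (4 * ((s:Int)+1) * ((i:Nat):Int)) = ((4*(s+1)*i : Nat) : Int) := by push_cast; ring
        rw [this, Int.toNat_natCast]
      have e2 : (4 * ((s:Int)+1)).toNat = 4*(s+1) := by
        have : (4 * ((s:Int)+1)) = ((4*(s+1) : Nat) : Int) := by push_cast; ring
        rw [this, Int.toNat_natCast]
      have p2 : (2:Nat)^(4*(s+1)*i) = (16^(s+1))^i := by
        rw [pow_mul, p1]
      have hseg : (x >>> (4 * ((s:Int)+1) * ((i:Nat):Int)).toNat) &&& ((1 <<< (4 * ((s:Int)+1)).toNat) - 1)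
          = x / (16^(s+1))^i % 16^(s+1) := by
        rw [e1, e2, Nat.one_shiftLeft, Nat.and_two_pow_sub_one_eq_mod,
            Nat.shiftRight_eq_div_pow, p1, p2]
      rw [hseg, hgetD, pvChunks_rev_getD s x i hic, if_neg hlast]
      have hmod : x / (16^(s+1))^i % 16^(s+1) < 16^(s+1) := Nat.mod_lt _ (by positivity)
      have hz : ((s:Int)+1) = (((s+1 : Nat)) : Int) := by push_cast; ring
      rw [hz, zfill_eq_pad (s+1) _ hmod (by omega)]

-- A's indicator-list bitmask value, as a Nat
def pvSum (cpus : List Int) : Nat → Nat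
  | 0 => 0
  | n+1 => pvSum cpus n + (if cpus.contains ((n:Nat):Int) then 2^n else 0)

lemma pvSum_lt (cpus : List Int) (n : Nat) : pvSum cpus n < 2^n := by
  induction n with
  | zero => simp [pvSum]
  | succ n ih =>
    have h2 : (2:Nat)^(n+1) = 2^n * 2 := pow_succ 2 n
    rw [pvSum]
    split_ifs <;> omega

lemma testBit_pvSum (cpus : List Int) (n j : Nat) :
    (pvSum cpus n).testBit j = (decide (j < n) && cpus.contains ((j:Nat):Int)) := by
  induction n with
  | zero => simp [pvSum]
  | succ n ih =>
    by_cases hc : cpus.contains ((n:Nat):Int)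
    · simp only [pvSum]
      rw [if_pos hc]
      have hor : pvSum cpus n + 2^n = 2^n ||| pvSum cpus n := by
        have := Nat.two_pow_add_eq_or_of_lt (pvSum_lt cpus n) 1
        rw [Nat.mul_one] at this
        omega
      rw [hor, Nat.testBit_or, Nat.testBit_two_pow, ih]
      by_cases hj : j = n
      · subst hj
        have hc' : ((j:Nat):Int) ∈ cpus := by simpa using hc
        simp [hc']
      · have h1 : decide (n = j) = false := by simp; omega
        have h2 : decide (j < n) = decide (j < n+1) := decide_eq_decide.mpr (by omega)
        rw [h1, h2]
        cases hb : cpus.contains ((j:Nat):Int) <;> simp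
    · simp only [pvSum]
      rw [if_neg hc]
      simp only [Nat.add_zero, ih]
      by_cases hj : j = n
      · subst hj
        have hc' : ((j:Nat):Int) ∉ cpus := by simpa using hc
        simp [hc']
      · have h2 : decide (j < n) = decide (j < n+1) := decide_eq_decide.mpr (by omega)
        rw [h2]

lemma testBit_fold (cpus : List Int) (j : Nat) : ∀ b : Nat,
    ((cpus.foldl (fun b (c : Int) => if 0 ≤ c then b ||| (1 <<< c.toNat) else b) b).testBit j)
      = (b.testBit j || cpus.any (fun c => decide (c = ((j:Nat):Int)))) := by
  induction cpus with
  | nil => intro b; simp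
  | cons c t ih =>
    intro b
    rw [List.foldl_cons, List.any_cons]
    by_cases hc : (0:Int) ≤ c
    · rw [if_pos hc, ih, Nat.one_shiftLeft, Nat.testBit_or, Nat.testBit_two_pow]
      have hcj : decide (c.toNat = j) = decide (c = ((j:Nat):Int)) := decide_eq_decide.mpr (by omega)
      rw [hcj]
      cases b.testBit j <;> cases hd : decide (c = ((j:Nat):Int)) <;> simp
    · rw [if_neg hc, ih]
      have : decide (c = ((j:Nat):Int)) = false := by
        simp only [decide_eq_false_iff_not]
        omega
      rw [this]
      simp

lemma binA (cpus : List Int) (n : Nat) : ∀ (acc : Int),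
    ((((PySem.List.pyRange 0 ((n:Nat):Int) 1).map
        (fun i => if cpus.contains i then (1:Int) else 0)).reverse).foldl (fun b digit => 2*b + digit) acc)
      = acc * 2^n + ((pvSum cpus n : Nat) : Int) := by
  induction n with
  | zero =>
    intro acc
    rw [PySem.List.pyRange_one_eq_nil (by omega)]
    simp [pvSum]
  | succ n ih =>
    intro acc
    have hr : PySem.List.pyRange 0 (((n+1 : Nat)):Int) 1
        = PySem.List.pyRange 0 ((n:Nat):Int) 1 ++ [((n:Nat):Int)] := by
      have hcast : (((n+1 : Nat)):Int) = ((n:Nat):Int) + 1 := by push_cast; ring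
      rw [hcast, PySem.List.pyRange_one_succ_right (by exact_mod_cast Nat.zero_le n)]
    rw [hr, List.map_append, List.reverse_append]
    simp only [List.map_cons, List.map_nil, List.reverse_cons, List.reverse_nil,
      List.nil_append, List.singleton_append, List.foldl_cons]
    rw [ih (2*acc + (if cpus.contains ((n:Nat):Int) then (1:Int) else 0))]
    simp only [pvSum]
    by_cases hm : ((n:Nat):Int) ∈ cpus <;> simp [hm] <;> push_cast <;> ring

-- the two bitmask computations agree
lemma bin_eq (cpus : List Int) (m : Int)
    (hmax : PySem.List.max? cpus (fun x => x) = some m) :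
    (((PySem.List.pyRange 0 (m+1) 1).map (fun i => if cpus.contains i then (1:Int) else 0)).reverse).foldl
        (fun b digit => 2*b + digit) 0
      = ((cpus.foldl (fun b (c : Int) => if 0 ≤ c then b ||| (1 <<< c.toNat) else b) 0 : Nat) : Int) := by
  rcases le_or_gt 0 m with hm | hm
  · have hn : m + 1 = (((m+1).toNat : Nat) : Int) := by omega
    rw [hn, binA cpus ((m+1).toNat) 0]
    rw [Int.zero_mul, Int.zero_add]
    congr 1
    apply Nat.eq_of_testBit_eq
    intro j
    rw [testBit_pvSum, testBit_fold]
    rw [Bool.eq_iff_iff]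
    simp only [Bool.or_eq_true, Bool.and_eq_true, decide_eq_true_eq]
    constructor
    · rintro ⟨hjn, hmem⟩
      right
      rw [List.any_eq_true]
      exact ⟨((j:Nat):Int), by simpa using hmem, by simp⟩
    · rintro (hfalse | hany)
      · simp at hfalse
      · rw [List.any_eq_true] at hany
        obtain ⟨c, hcm, hcj⟩ := hany
        simp only [decide_eq_true_eq] at hcj
        subst hcj
        have := PySem.List.max?_isMax hmax _ hcm
        refine ⟨by omega, by simpa using hcm⟩
  · rw [PySem.List.pyRange_one_eq_nil (by omega)]
    simp only [List.map_nil, List.reverse_nil, List.foldl_nil]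
    have hz : (cpus.foldl (fun b (c : Int) => if 0 ≤ c then b ||| (1 <<< c.toNat) else b) 0) = 0 := by
      apply Nat.eq_of_testBit_eq
      intro j
      rw [testBit_fold]
      have hany : cpus.any (fun c => decide (c = ((j:Nat):Int))) = false := by
        rw [List.any_eq_false]
        intro c hcm
        have := PySem.List.max?_isMax hmax _ hcm
        simp only [decide_eq_true_eq]
        omega
      simp [hany]
    rw [hz]
    simp

-- ===== VERDICT (by name: the statement is the Claim_ definition above) =====
theorem cpus_to_hex_py_spec : Claim_equal_cpus_to_hex_py := by
  unfold Claim_equal_cpus_to_hex_py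
  intro cpus msl hdom hpre
  unfold Spec_cpus_to_hex_py
  obtain ⟨hne, hmsl⟩ := hpre
  obtain ⟨m, hmax⟩ : ∃ m, PySem.List.max? cpus (fun x => x) = some m := by
    cases hx : PySem.List.max? cpus (fun x => x) with
    | none => exact absurd ((PySem.List.max?_eq_none_iff _ _).mp hx) hne
    | some m => exact ⟨m, rfl⟩
  simp only [cpus_to_hex_py, cpus_to_hex_py_alt, hmax, Option.getD_some]
  rw [bin_eq cpus m hmax, Int.toNat_natCast]
  cases msl with
  | none => rfl
  | some mslv =>
    simp only [Option.getD_some] at hmsl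
    have hms : mslv = ((mslv.toNat - 1 : Nat) : Int) + 1 := by omega
    dsimp only
    rw [hms, A_seg (mslv.toNat - 1) _, B_seg (mslv.toNat - 1) _]
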